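-- pv_equiv track=rewrite | github.com/gabomm99/Intro-to-Prog | exercises/ex04/quiz_redo.py | is_tar
-- ===== SOURCE A (Python) =====
-- LENGTH_TO_INDEX: int = 1
--
-- MIN_NUM_LETTERS: int = 3
--
-- def is_tar(word: str) -> bool:
--     """Word has T, A, and R at the end?"""
--     word.islower
--     i: int = 0
--     last_letter: int = len(word) - LENGTH_TO_INDEX
--     if len(word) < MIN_NUM_LETTERS:
--         return False
--     if word[i] == "t" or word[i] == "T":
--         i += 1
--         if word[i] == "a" or word[i] == "A":
--             while word[i] == "a" or word[i] == "A":
--                 if i == last_letter: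
--                     return False
--                 i += 1
--             if word[i] == "r" or word[i] == "R":
--                 if i == last_letter:
--                     return True
--             else:
--                 return False
--         else:
--             return False
--     return False
-- ===== SOURCE B (Python) =====
-- def is_tar(word: str) -> bool:
--     """Word has T, A, and R at the end?"""
--     if len(word) < 3:
--         return False
--     return (word[0] in ('t', 'T')
--             and word[-1] in ('r', 'R')
--             and all(c in ('a', 'A') for c in word[1:-1]))
-- ===== Notes on version B (the rewrite author's own statement) =====
-- stated objective: simpler
-- what changed: Replaced the positional pointer walk (index variable, while loop over the A-run, in-loop last-letter checks) by a by-parts decomposition: length guard, then first char in {t,T}, last char in {r,R}, and every middle char in {a,A}.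
import Mathlib
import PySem

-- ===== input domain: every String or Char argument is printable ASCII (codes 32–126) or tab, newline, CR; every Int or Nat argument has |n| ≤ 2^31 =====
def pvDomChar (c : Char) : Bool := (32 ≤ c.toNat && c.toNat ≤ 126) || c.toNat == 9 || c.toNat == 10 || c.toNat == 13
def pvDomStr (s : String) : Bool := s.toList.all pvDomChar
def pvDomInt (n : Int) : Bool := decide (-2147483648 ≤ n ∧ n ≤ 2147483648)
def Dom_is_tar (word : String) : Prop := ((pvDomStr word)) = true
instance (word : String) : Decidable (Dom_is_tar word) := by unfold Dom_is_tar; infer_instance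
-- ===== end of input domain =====

-- B replaces A's index-pointer walk (while loop over the A-run with in-loop
-- last-letter tests) by a by-parts check of first char, last char and the
-- middle slice (objective: simpler; same result on every input).

-- ===== PORT A =====
-- A's `while word[i] == "a" or word[i] == "A"` loop together with the r-check
-- that follows it; fuel = cs.length bounds the index walk (the loop returns
-- False at i == last_letter before i could leave the word, so the fuel never
-- runs out on the inputs A reaches)
def isTarWhile (cs : List Char) (last : Int) (i : Int) : Nat → Bool
  | 0 => false
  | fuel + 1 =>
    let c := PySem.List.pyGetD cs i ' '
    if c == 'a' || c == 'A' then
      if i == last then false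
      else isTarWhile cs last (i + 1) fuel
    else
      if c == 'r' || c == 'R' then decide (i = last) else false

def is_tar (word : String) : Bool :=
  let cs := word.toList
  let last : Int := (cs.length : Int) - 1    -- len(word) - LENGTH_TO_INDEX
  if (cs.length : Int) < 3 then false        -- len(word) < MIN_NUM_LETTERS
  else if PySem.List.pyGetD cs 0 ' ' == 't' || PySem.List.pyGetD cs 0 ' ' == 'T' then
    if PySem.List.pyGetD cs 1 ' ' == 'a' || PySem.List.pyGetD cs 1 ' ' == 'A' then
      isTarWhile cs last 1 cs.length
    else false
  else false

-- ===== PORT B =====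
def is_tar_alt (word : String) : Bool :=
  let cs := word.toList
  if cs.length < 3 then false
  else
    (PySem.List.pyGetD cs 0 ' ' == 't' || PySem.List.pyGetD cs 0 ' ' == 'T')
    && (PySem.List.pyGetD cs (-1) ' ' == 'r' || PySem.List.pyGetD cs (-1) ' ' == 'R')
    && (PySem.List.slice cs (some 1) (some (-1))).all (fun c => c == 'a' || c == 'A')

-- ===== PRECONDITION & SPEC =====
def Spec_is_tar (word : String) (out : Bool) : Prop := out = is_tar_alt word
instance (word : String) (out : Bool) : Decidable (Spec_is_tar word out) := by unfold Spec_is_tar; infer_instance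

-- ===== CLAIM (what is proved, stated in full; the proofs are below) =====
def Claim_equal_is_tar : Prop := ∀ (word : String), Dom_is_tar word → Spec_is_tar word (is_tar word)

-- ===== LEMMAS AND PROOFS =====

-- word[1:-1] is tail-then-dropLast
lemma slice_one_neg_one (cs : List Char) :
    PySem.List.slice cs (some 1) (some (-1)) = cs.tail.dropLast := by
  simp [PySem.List.slice, PySem.List.clampIdx, List.dropLast_eq_take]
  rcases cs with _ | ⟨a, t⟩
  · simp
  · simp

-- A's while loop (plus the r-check after it), started at position i < len,
-- answers "positions i .. len-2 are all a/A, and the last char is r/R"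
lemma isTarWhile_eq (fuel : Nat) (cs : List Char) (i : Nat)
    (hi : i < cs.length) (hf : cs.length - i ≤ fuel) :
    isTarWhile cs ((cs.length : Int) - 1) (i : Int) fuel =
      ((cs.drop i).dropLast.all (fun c => c == 'a' || c == 'A')
        && (PySem.List.pyGetD cs ((cs.length : Int) - 1) ' ' == 'r'
            || PySem.List.pyGetD cs ((cs.length : Int) - 1) ' ' == 'R')) := by
  induction fuel generalizing i with
  | zero => omega
  | succ fuel ih =>
    have hget : PySem.List.pyGetD cs (i : Int) ' ' = cs[i] := by
      rw [PySem.List.pyGetD_natCast, List.getD_eq_getElem _ _ hi]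
    rw [isTarWhile]
    simp only [hget]
    by_cases ha : (cs[i] == 'a' || cs[i] == 'A') = true
    · rw [if_pos ha]
      by_cases hlast : i = cs.length - 1
      · have : ((i : Int) == (cs.length : Int) - 1) = true := by
          simp; omega
        rw [if_pos this]
        have hdrop : cs.drop i = [cs[i]] := by
          rw [List.drop_eq_getElem_cons hi]
          have : cs.drop (i+1) = [] := by
            apply List.drop_eq_nil_of_le; omega
          rw [this]
        have hlastget : PySem.List.pyGetD cs ((cs.length : Int) - 1) ' ' = cs[i] := by
          have : ((cs.length : Int) - 1) = ((i : Nat) : Int) := by omega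
          rw [this, hget]
        rw [hdrop, hlastget]
        rcases Bool.or_eq_true .. |>.mp ha with h | h <;> simp_all
      · have : ((i : Int) == (cs.length : Int) - 1) = false := by
          simp; omega
        rw [if_neg (by simp [this])]
        have h1 : i + 1 < cs.length := by omega
        have : ((i : Int) + 1) = (((i+1 : Nat)) : Int) := by push_cast; ring
        rw [this, ih (i+1) h1 (by omega)]
        have hdrop : cs.drop i = cs[i] :: cs.drop (i+1) := List.drop_eq_getElem_cons hi
        have hne : cs.drop (i+1) ≠ [] := by
          simp [List.drop_eq_nil_iff]; omega
        rw [hdrop, List.dropLast_cons_of_ne_nil hne]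
        simp [ha]
    · rw [if_neg ha]
      have hdrop : cs.drop i = cs[i] :: cs.drop (i+1) := List.drop_eq_getElem_cons hi
      by_cases hlast : i = cs.length - 1
      · have hd2 : cs.drop (i+1) = [] := by
          apply List.drop_eq_nil_of_le; omega
        have hlastget : PySem.List.pyGetD cs ((cs.length : Int) - 1) ' ' = cs[i] := by
          have : ((cs.length : Int) - 1) = ((i : Nat) : Int) := by omega
          rw [this, hget]
        have hdec : decide ((i:Int) = (cs.length:Int) - 1) = true := by simp; omega
        rw [hdrop, hd2, hlastget]
        cases (cs[i] == 'r' || cs[i] == 'R') <;> simp [hdec]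
      · have hne : cs.drop (i+1) ≠ [] := by
          simp [List.drop_eq_nil_iff]; omega
        have hdec : decide ((i:Int) = (cs.length:Int) - 1) = false := by simp; omega
        rw [hdrop, List.dropLast_cons_of_ne_nil hne]
        simp [ha, hdec]

-- the two port bodies agree, stated over the character list
lemma main_list (cs : List Char) :
    (if (cs.length : Int) < 3 then false
     else if PySem.List.pyGetD cs 0 ' ' == 't' || PySem.List.pyGetD cs 0 ' ' == 'T' then
       if PySem.List.pyGetD cs 1 ' ' == 'a' || PySem.List.pyGetD cs 1 ' ' == 'A' then
         isTarWhile cs ((cs.length : Int) - 1) 1 cs.length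
       else false
     else false) =
    (if cs.length < 3 then false
     else
       (PySem.List.pyGetD cs 0 ' ' == 't' || PySem.List.pyGetD cs 0 ' ' == 'T')
       && (PySem.List.pyGetD cs (-1) ' ' == 'r' || PySem.List.pyGetD cs (-1) ' ' == 'R')
       && (PySem.List.slice cs (some 1) (some (-1))).all (fun c => c == 'a' || c == 'A')) := by
  by_cases hlen : cs.length < 3
  · rw [if_pos (by exact_mod_cast hlen), if_pos hlen]
  · have h3 : 3 ≤ cs.length := by omega
    rw [if_neg (by exact_mod_cast hlen), if_neg hlen]
    have hne : cs ≠ [] := by intro h; simp [h] at h3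
    have h1 : (1 : Nat) < cs.length := by omega
    have hwhile := isTarWhile_eq cs.length cs 1 h1 (by omega)
    have hone : ((1 : Nat) : Int) = (1 : Int) := rfl
    rw [hone] at hwhile
    rw [hwhile]
    have hneg : PySem.List.pyGetD cs (-1) ' ' = PySem.List.pyGetD cs ((cs.length : Int) - 1) ' ' := by
      rw [PySem.List.pyGetD_neg_one _ _ hne]
      have h' : ((cs.length : Int) - 1) = (((cs.length - 1 : Nat)) : Int) := by omega
      rw [h', PySem.List.pyGetD_natCast, List.getLast_eq_getElem,
        List.getD_eq_getElem _ _ (by omega)]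
    rw [slice_one_neg_one, hneg]
    have hget1 : PySem.List.pyGetD cs 1 ' ' = cs[1] := by
      have h' : (1 : Int) = ((1 : Nat) : Int) := rfl
      rw [h', PySem.List.pyGetD_natCast, List.getD_eq_getElem _ _ h1]
    have htail : cs.tail.dropLast = cs[1] :: (cs.drop 2).dropLast := by
      rw [← List.drop_one, List.drop_eq_getElem_cons h1]
      exact List.dropLast_cons_of_ne_nil (by simp [List.drop_eq_nil_iff]; omega)
    have hdrop1 : (cs.drop 1).dropLast = cs[1] :: (cs.drop 2).dropLast := by
      rw [← htail, List.drop_one]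
    rw [hdrop1, hget1, htail]
    simp only [List.all_cons]
    cases (cs[0] == 't' || cs[0] == 'T') <;>
      cases (cs[1] == 'a' || cs[1] == 'A') <;>
        cases ((cs.drop 2).dropLast.all fun c => c == 'a' || c == 'A') <;>
          cases (PySem.List.pyGetD cs ((cs.length : Int) - 1) ' ' == 'r'
            || PySem.List.pyGetD cs ((cs.length : Int) - 1) ' ' == 'R') <;>
            simp_all [beq_iff_eq] <;> rfl

-- ===== VERDICT (by name: the statement is the Claim_ definition above) =====
theorem is_tar_spec : Claim_equal_is_tar := by
  intro word _
  unfold Spec_is_tar is_tar is_tar_alt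
  exact main_list word.toList
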